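-- pv_equiv track=rewrite | github.com/isabelanery/inventory_report | inventory_report/reports/simple_report.py | count_company_products
-- ===== SOURCE A (Python) =====
-- def count_company_products(products):
--     companies = {}
--
--     for product in products:
--         if product["nome_da_empresa"] in companies:
--             companies[product["nome_da_empresa"]] += 1
--         else:
--             companies[product["nome_da_empresa"]] = 1
--
--     return companies
-- ===== SOURCE B (Python) =====
-- def count_company_products(products):
--     names = [p["nome_da_empresa"] for p in products]
--     seen = []
--     for n in names:
--         if n not in seen:
--             seen.append(n)
--     return {n: names.count(n) for n in seen}
-- ===== Notes on version B (the rewrite author's own statement) =====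
-- stated objective: alternative
-- what changed: Replaces the single-pass hash-counter accumulation with a two-phase decomposition: extract the name list, dedup it in first-seen order, then count each distinct name with list.count.
import Mathlib
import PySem

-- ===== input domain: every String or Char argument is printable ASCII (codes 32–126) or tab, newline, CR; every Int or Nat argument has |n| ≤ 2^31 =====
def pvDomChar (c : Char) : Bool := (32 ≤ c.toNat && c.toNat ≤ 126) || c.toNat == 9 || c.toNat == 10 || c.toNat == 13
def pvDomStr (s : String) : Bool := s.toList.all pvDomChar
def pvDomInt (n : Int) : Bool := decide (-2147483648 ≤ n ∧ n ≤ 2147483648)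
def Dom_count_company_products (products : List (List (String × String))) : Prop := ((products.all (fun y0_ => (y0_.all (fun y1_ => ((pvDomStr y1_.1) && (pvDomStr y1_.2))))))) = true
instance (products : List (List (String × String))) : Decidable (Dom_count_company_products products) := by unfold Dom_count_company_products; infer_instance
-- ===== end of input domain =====

-- B changes the decomposition (extract names, dedup in first-seen order, count each distinct name),
-- not the result; equivalence is about the returned dict (as an association list in insertion order).

-- ===== PORT A =====
-- product["nome_da_empresa"]; Pre_ guarantees the key is present, so getD's default is never used
def pvName (p : List (String × String)) : String := (PySem.Dict.ofList p).getD "nome_da_empresa" ""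

def count_company_products (products : List (List (String × String))) : List (String × Int) :=
  (products.foldl
    (fun (companies : PySem.Dict String Int) product =>
      if companies.contains (pvName product) then
        companies.insert (pvName product) (companies.getD (pvName product) 0 + 1)
      else
        companies.insert (pvName product) 1)
    PySem.Dict.empty).items

-- ===== PORT B =====
def pvNames (products : List (List (String × String))) : List String := products.map pvName

def count_company_products_alt (products : List (List (String × String))) : List (String × Int) :=
  ((pvNames products).foldl PySem.Set.add []).map
    (fun n => (n, (PySem.List.count (pvNames products) n : Int)))

-- ===== PRECONDITION & SPEC =====
-- Pre_ excludes exactly the inputs where A raises KeyError: a product without the key "nome_da_empresa".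
def Pre_count_company_products (products : List (List (String × String))) : Prop :=
  products.all (fun p => (PySem.Dict.ofList p).contains "nome_da_empresa") = true
instance (products : List (List (String × String))) : Decidable (Pre_count_company_products products) := by unfold Pre_count_company_products; infer_instance
def pvWitness_count_company_products : (List (List (String × String))) :=
  [[("nome_da_empresa", "Acme")], [("nome_da_empresa", "Beta")], [("nome_da_empresa", "Acme")]]
def Spec_count_company_products (products : List (List (String × String))) (out : List (String × Int)) : Prop := out = count_company_products_alt products
instance (products : List (List (String × String))) (out : List (String × Int)) : Decidable (Spec_count_company_products products out) := by unfold Spec_count_company_products; infer_instance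

-- ===== CLAIM (what is proved, stated in full; the proofs are below) =====
def Claim_equal_count_company_products : Prop := ∀ (products : List (List (String × String))), Dom_count_company_products products → Pre_count_company_products products → Spec_count_company_products products (count_company_products products)

-- ===== LEMMAS AND PROOFS =====

lemma branch_eq (d : PySem.Dict String Int) (n : String) :
    (if d.contains n then d.insert n (d.getD n 0 + 1) else d.insert n 1)
      = d.insert n (d.getD n 0 + 1) := by
  by_cases h : d.contains n = true
  · rw [if_pos h]
  · have hf : d.items.find? (fun p => p.1 == n) = none := by
      rw [List.find?_eq_none]
      intro p hp
      simp [PySem.Dict.contains, List.any_eq_true] at h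
      simp only [Bool.not_eq_true, beq_eq_false_iff_ne, ne_eq]
      intro hn
      exact h p.2 (by rw [← hn]; simpa using hp)
    have h0 : d.getD n 0 = 0 := by
      simp [PySem.Dict.getD, PySem.Dict.get?, hf]
    rw [if_neg h, h0]
    norm_num

-- ===== VERDICT (by name: the statement is the Claim_ definition above) =====
theorem count_company_products_spec : Claim_equal_count_company_products := by
  intro products _ _
  unfold Spec_count_company_products count_company_products count_company_products_alt
  rw [show (products.foldl
      (fun (companies : PySem.Dict String Int) product =>
        if companies.contains (pvName product) then
          companies.insert (pvName product) (companies.getD (pvName product) 0 + 1)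
        else
          companies.insert (pvName product) 1)
      PySem.Dict.empty)
    = (pvNames products).foldl
        (fun (d : PySem.Dict String Int) n =>
          if d.contains n then d.insert n (d.getD n 0 + 1) else d.insert n 1)
        PySem.Dict.empty
    from (List.foldl_map (f := pvName)
      (g := fun (d : PySem.Dict String Int) n =>
        if d.contains n then d.insert n (d.getD n 0 + 1) else d.insert n 1)
      (l := products) (init := PySem.Dict.empty)).symm]
  rw [PySem.List.foldl_congr_mem (pvNames products) _
      (fun d x => d.insert x (d.getD x 0 + 1)) PySem.Dict.empty
      (fun acc x _ => branch_eq acc x)]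
  rw [PySem.Dict.foldl_insert_getD_add_one_eq_counter, PySem.Dict.items_counter]
  rw [← PySem.Set.ofList_eq_foldl]
  simp [PySem.List.count]
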